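-- pv_equiv track=rewrite | github.com/sneh2401/Ransomeware_Timeline_Reconstruction | backend/a.py | _summarize_cluster
-- ===== SOURCE A (Python) =====
-- from collections import defaultdict, Counter
-- from typing import Dict, List
--
-- def _summarize_cluster(events: List[Dict]) -> str:
--     """Summarize a cluster of correlated events"""
--     sources = Counter([e['source'] for e in events])
--     summary = f"Cluster of {len(events)} events from {', '.join(sources.keys())}"
--
--     # Check for specific patterns
--     messages = ' '.join([e.get('message', '') for e in events]).lower()
--     if 'failed' in messages and 'login' in messages:
--         summary += " - Possible brute force attempt"
--     if 'powershell' in messages or 'cmd' in messages: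
--         summary += " - Command execution detected"
--     if 'service' in messages or 'registry' in messages:
--         summary += " - System modification detected"
--
--     return summary
-- ===== SOURCE B (Python) =====
-- def _summarize_cluster(events):
--     """Summarize a cluster of correlated events (single pass, per-message flags)."""
--     seen = []
--     seen_set = set()
--     failed = login = powershell = cmd = service = registry = False
--     for e in events:
--         s = e['source']
--         if s not in seen_set:
--             seen_set.add(s)
--             seen.append(s)
--         m = e.get('message', '').lower()
--         failed = failed or ('failed' in m)
--         login = login or ('login' in m)
--         powershell = powershell or ('powershell' in m)
--         cmd = cmd or ('cmd' in m)
--         service = service or ('service' in m)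
--         registry = registry or ('registry' in m)
--     summary = f"Cluster of {len(events)} events from {', '.join(seen)}"
--     if failed and login:
--         summary += " - Possible brute force attempt"
--     if powershell or cmd:
--         summary += " - Command execution detected"
--     if service or registry:
--         summary += " - System modification detected"
--     return summary
-- ===== Notes on version B (the rewrite author's own statement) =====
-- stated objective: alternative
-- what changed: Single pass over events maintaining an order-preserving seen-set of sources and six per-pattern boolean flags, instead of building a Counter and one big joined lowercase message string scanned by six substring tests; correct because none of the six patterns contains a space, so a match in the joined string lies inside one message.
import Mathlib
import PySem

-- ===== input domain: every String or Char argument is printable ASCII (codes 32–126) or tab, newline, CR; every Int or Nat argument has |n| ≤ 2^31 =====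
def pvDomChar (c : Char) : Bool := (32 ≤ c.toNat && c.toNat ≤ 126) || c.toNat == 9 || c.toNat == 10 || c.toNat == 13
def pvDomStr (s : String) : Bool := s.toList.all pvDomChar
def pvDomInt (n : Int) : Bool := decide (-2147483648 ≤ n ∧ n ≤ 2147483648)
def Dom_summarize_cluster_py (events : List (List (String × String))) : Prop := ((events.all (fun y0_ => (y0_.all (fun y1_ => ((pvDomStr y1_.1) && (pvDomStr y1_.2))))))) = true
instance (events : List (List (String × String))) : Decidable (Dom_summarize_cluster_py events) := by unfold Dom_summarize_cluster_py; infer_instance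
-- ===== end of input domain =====

-- B replaces A's Counter + joined-lowercased-message substring scan by one pass with an
-- order-preserving seen-set of sources and six per-message pattern flags (objective: alternative).


-- ===== PORT A =====
-- e['source']: Dict.get? = none is Python's KeyError, excluded by Pre_; .getD "" is only the
-- total-function placeholder outside Pre_.
def summarize_cluster_py (events : List (List (String × String))) : String :=
  let sources := PySem.Dict.counter (events.map (fun e => ((PySem.Dict.ofList e).get? "source").getD ""))
  let summary := "Cluster of " ++ PySem.Int.toStr (events.length : Int) ++ " events from " ++
      PySem.Str.join ", " sources.keys
  let messages := PySem.Str.lower (PySem.Str.join " "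
      (events.map (fun e => (PySem.Dict.ofList e).getD "message" "")))
  let summary := if PySem.Str.isIn "failed" messages && PySem.Str.isIn "login" messages then
      summary ++ " - Possible brute force attempt" else summary
  let summary := if PySem.Str.isIn "powershell" messages || PySem.Str.isIn "cmd" messages then
      summary ++ " - Command execution detected" else summary
  let summary := if PySem.Str.isIn "service" messages || PySem.Str.isIn "registry" messages then
      summary ++ " - System modification detected" else summary
  summary

-- ===== PORT B =====
-- State of Source B's loop: (seen sources as an ordered set, failed, login, powershell, cmd, service, registry).
def pvBStep (st : PySem.Set String × Bool × Bool × Bool × Bool × Bool × Bool)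
    (e : List (String × String)) : PySem.Set String × Bool × Bool × Bool × Bool × Bool × Bool :=
  let s := ((PySem.Dict.ofList e).get? "source").getD ""
  let m := PySem.Str.lower ((PySem.Dict.ofList e).getD "message" "")
  (PySem.Set.add st.1 s,
   st.2.1 || PySem.Str.isIn "failed" m,
   st.2.2.1 || PySem.Str.isIn "login" m,
   st.2.2.2.1 || PySem.Str.isIn "powershell" m,
   st.2.2.2.2.1 || PySem.Str.isIn "cmd" m,
   st.2.2.2.2.2.1 || PySem.Str.isIn "service" m,
   st.2.2.2.2.2.2 || PySem.Str.isIn "registry" m)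

def summarize_cluster_py_alt (events : List (List (String × String))) : String :=
  let st := events.foldl pvBStep (PySem.Set.empty, false, false, false, false, false, false)
  let summary := "Cluster of " ++ PySem.Int.toStr (events.length : Int) ++ " events from " ++
      PySem.Str.join ", " st.1
  let summary := if st.2.1 && st.2.2.1 then summary ++ " - Possible brute force attempt" else summary
  let summary := if st.2.2.2.1 || st.2.2.2.2.1 then summary ++ " - Command execution detected" else summary
  let summary := if st.2.2.2.2.2.1 || st.2.2.2.2.2.2 then summary ++ " - System modification detected" else summary
  summary

-- ===== PRECONDITION & SPEC =====
-- Pre_ excludes exactly the events without a 'source' key, on which Python A raises KeyError.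
def Pre_summarize_cluster_py (events : List (List (String × String))) : Prop :=
  ∀ e ∈ events, "source" ∈ e.map Prod.fst
instance (events : List (List (String × String))) : Decidable (Pre_summarize_cluster_py events) := by
  unfold Pre_summarize_cluster_py; infer_instance
def pvWitness_summarize_cluster_py : (List (List (String × String))) :=
  [[("source", "auth"), ("message", "Failed login from host")], [("source", "sys")]]

def Spec_summarize_cluster_py (events : List (List (String × String))) (out : String) : Prop := out = summarize_cluster_py_alt events
instance (events : List (List (String × String))) (out : String) : Decidable (Spec_summarize_cluster_py events out) := by unfold Spec_summarize_cluster_py; infer_instance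

-- ===== CLAIM (what is proved, stated in full; the proofs are below) =====
def Claim_equal_summarize_cluster_py : Prop := ∀ (events : List (List (String × String))), Dom_summarize_cluster_py events → Pre_summarize_cluster_py events → Spec_summarize_cluster_py events (summarize_cluster_py events)

-- ===== LEMMAS AND PROOFS =====

-- a pattern without ' ' that is a prefix of a ++ ' ' :: b is a prefix of a
theorem pvPrefixSplit (pat a b : List Char) (hs : ' ' ∉ pat) (h : pat <+: (a ++ ' ' :: b)) :
    pat <+: a := by
  induction pat generalizing a with
  | nil => exact List.nil_prefix
  | cons p ps ih =>
    cases a with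
    | nil =>
      rcases h with ⟨t, ht⟩
      simp at ht
      exact absurd (ht.1 ▸ List.mem_cons_self) hs
    | cons x a' =>
      rcases (List.cons_prefix_cons.mp h) with ⟨hpx, hrest⟩
      exact hpx ▸ List.cons_prefix_cons.mpr ⟨rfl, ih a' (fun hm => hs (List.mem_cons_of_mem _ hm)) hrest⟩

-- an infix without ' ' of a ++ ' ' :: b lies inside a or inside b
theorem pvInfixSplit (pat a b : List Char) (hs : ' ' ∉ pat) (hne : pat ≠ []) :
    pat <:+: (a ++ ' ' :: b) ↔ pat <:+: a ∨ pat <:+: b := by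
  constructor
  · intro h
    induction a with
    | nil =>
      simp only [List.nil_append] at h
      rcases List.infix_cons_iff.mp h with hp | hi
      · cases pat with
        | nil => exact absurd rfl hne
        | cons p ps =>
          rcases List.cons_prefix_cons.mp hp with ⟨hpx, _⟩
          exact absurd (hpx ▸ List.mem_cons_self) hs
      · exact Or.inr hi
    | cons x a' ih =>
      rcases List.infix_cons_iff.mp h with hp | hi
      · exact Or.inl (pvPrefixSplit pat (x :: a') b hs hp).isInfix
      · rcases ih hi with h1 | h2
        · exact Or.inl (List.infix_cons h1)
        · exact Or.inr h2
  · rintro (h | h)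
    · exact h.trans ⟨[], ' ' :: b, by simp⟩
    · exact h.trans ⟨a ++ [' '], [], by simp⟩

-- substring test on a space-joined list = any per-part substring test (pattern space-free, nonempty)
theorem pvIsInJoin (pat : List Char) (parts : List (List Char)) (hs : ' ' ∉ pat) (hne : pat ≠ []) :
    PySem.Chars.isIn pat (PySem.Chars.join [' '] parts) = parts.any (fun m => PySem.Chars.isIn pat m) := by
  induction parts with
  | nil =>
    rw [PySem.Chars.join_nil]
    simp only [List.any_nil]
    exact PySem.Chars.isIn_eq_false_iff pat [] |>.mpr (fun h => hne (List.eq_nil_of_infix_nil h))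
  | cons x rest ih =>
    cases rest with
    | nil => simp [PySem.Chars.join_singleton]
    | cons y rest' =>
      rw [PySem.Chars.join_cons_cons]
      have hj : x ++ [' '] ++ PySem.Chars.join [' '] (y :: rest') = x ++ ' ' :: PySem.Chars.join [' '] (y :: rest') := by simp
      rw [hj]
      by_cases h : pat <:+: (x ++ ' ' :: PySem.Chars.join [' '] (y :: rest'))
      · rw [(PySem.Chars.isIn_iff_infix _ _).mpr h]
        rcases (pvInfixSplit pat x _ hs hne).mp h with h1 | h2
        · rw [List.any_cons, (PySem.Chars.isIn_iff_infix _ _).mpr h1]; simp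
        · rw [List.any_cons, ← ih, (PySem.Chars.isIn_iff_infix _ _).mpr h2]; simp
      · rw [(PySem.Chars.isIn_eq_false_iff _ _).mpr h]
        have hx : PySem.Chars.isIn pat x = false :=
          (PySem.Chars.isIn_eq_false_iff _ _).mpr (fun hi => h ((pvInfixSplit pat x _ hs hne).mpr (Or.inl hi)))
        have hr : PySem.Chars.isIn pat (PySem.Chars.join [' '] (y :: rest')) = false :=
          (PySem.Chars.isIn_eq_false_iff _ _).mpr (fun hi => h ((pvInfixSplit pat x _ hs hne).mpr (Or.inr hi)))
        rw [List.any_cons, hx, ← ih, hr]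
        simp

-- lowercasing commutes with space-joining
theorem pvLowerJoin (parts : List (List Char)) :
    PySem.Chars.lower (PySem.Chars.join [' '] parts) = PySem.Chars.join [' '] (parts.map PySem.Chars.lower) := by
  induction parts with
  | nil => simp [PySem.Chars.join_nil, PySem.Chars.lower]
  | cons x rest ih =>
    cases rest with
    | nil => simp [PySem.Chars.join_singleton]
    | cons y rest' =>
      rw [PySem.Chars.join_cons_cons, List.map_cons, List.map_cons, PySem.Chars.join_cons_cons,
          ← List.map_cons, ← ih]
      have hsp : PySem.Chars.lowerChar ' ' = ' ' := by decide
      simp [PySem.Chars.lower, List.map_append, hsp]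

-- the per-event lowered message
def pvMsg (e : List (String × String)) : String :=
  PySem.Str.lower ((PySem.Dict.ofList e).getD "message" "")

-- A's substring test on the joined lowered messages = any per-event test
theorem pvPatEq (pat : String) (events : List (List (String × String)))
    (hs : ' ' ∉ pat.toList) (hne : pat.toList ≠ []) :
    PySem.Str.isIn pat (PySem.Str.lower (PySem.Str.join " "
        (events.map (fun e => (PySem.Dict.ofList e).getD "message" ""))))
      = events.any (fun e => PySem.Str.isIn pat (pvMsg e)) := by
  rw [PySem.Str.isIn_eq, PySem.Str.toList_lower, PySem.Str.toList_join]
  have hsep : (" " : String).toList = [' '] := rfl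
  rw [hsep, pvLowerJoin, List.map_map, pvIsInJoin pat.toList _ hs hne]
  simp only [List.any_map]
  congr 1
  funext e
  simp [Function.comp, pvMsg, PySem.Str.isIn_eq, PySem.Str.toList_lower]

-- characterisation of B's fold
theorem pvFoldChar (events : List (List (String × String)))
    (s0 : PySem.Set String) (f0 l0 p0 c0 v0 r0 : Bool) :
    events.foldl pvBStep (s0, f0, l0, p0, c0, v0, r0) =
      (events.foldl (fun s e => PySem.Set.add s (((PySem.Dict.ofList e).get? "source").getD "")) s0,
       f0 || events.any (fun e => PySem.Str.isIn "failed" (pvMsg e)),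
       l0 || events.any (fun e => PySem.Str.isIn "login" (pvMsg e)),
       p0 || events.any (fun e => PySem.Str.isIn "powershell" (pvMsg e)),
       c0 || events.any (fun e => PySem.Str.isIn "cmd" (pvMsg e)),
       v0 || events.any (fun e => PySem.Str.isIn "service" (pvMsg e)),
       r0 || events.any (fun e => PySem.Str.isIn "registry" (pvMsg e))) := by
  induction events generalizing s0 f0 l0 p0 c0 v0 r0 with
  | nil => simp
  | cons e rest ih =>
    simp only [List.foldl_cons, List.any_cons]
    rw [ih]
    simp [pvBStep, pvMsg, Bool.or_assoc]

-- B's seen-set is Counter's key list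
theorem pvSeenEq (events : List (List (String × String))) :
    events.foldl (fun s e => PySem.Set.add s (((PySem.Dict.ofList e).get? "source").getD "")) PySem.Set.empty
      = (PySem.Dict.counter (events.map (fun e => ((PySem.Dict.ofList e).get? "source").getD ""))).keys := by
  rw [PySem.Dict.keys_counter, PySem.Set.ofList_eq_foldl, List.foldl_map]
  rfl

-- ===== VERDICT (by name: the statement is the Claim_ definition above) =====
theorem summarize_cluster_py_spec : Claim_equal_summarize_cluster_py := by
  intro events _ _
  show summarize_cluster_py events = summarize_cluster_py_alt events
  unfold summarize_cluster_py summarize_cluster_py_alt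
  rw [pvFoldChar]
  simp only [pvSeenEq]
  rw [pvPatEq "failed" events (by decide) (by decide),
      pvPatEq "login" events (by decide) (by decide),
      pvPatEq "powershell" events (by decide) (by decide),
      pvPatEq "cmd" events (by decide) (by decide),
      pvPatEq "service" events (by decide) (by decide),
      pvPatEq "registry" events (by decide) (by decide)]
  simp
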